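-- pv_equiv track=rewrite | github.com/s0perdel/Olympiad-21-22 | task C.py | findAvg
-- ===== SOURCE A (Python) =====
-- def findAvg(a1,a2):
-- 	if a1 > a2:
-- 		a = list(range(a2,a1+1))
-- 	else:
-- 		a = list(range(a1,a2+1))
-- 	while len(a) > 2:
-- 		a.pop(0)
-- 		a.pop(-1)
-- 	return a[0]
-- ===== SOURCE B (Python) =====
-- def findAvg(a1, a2):
--     return (a1 + a2) // 2
-- ===== Notes on version B (the rewrite author's own statement) =====
-- stated objective: faster
-- what changed: B replaces building the whole integer range and repeatedly popping both ends with the closed form (a1+a2)//2.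
import Mathlib
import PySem

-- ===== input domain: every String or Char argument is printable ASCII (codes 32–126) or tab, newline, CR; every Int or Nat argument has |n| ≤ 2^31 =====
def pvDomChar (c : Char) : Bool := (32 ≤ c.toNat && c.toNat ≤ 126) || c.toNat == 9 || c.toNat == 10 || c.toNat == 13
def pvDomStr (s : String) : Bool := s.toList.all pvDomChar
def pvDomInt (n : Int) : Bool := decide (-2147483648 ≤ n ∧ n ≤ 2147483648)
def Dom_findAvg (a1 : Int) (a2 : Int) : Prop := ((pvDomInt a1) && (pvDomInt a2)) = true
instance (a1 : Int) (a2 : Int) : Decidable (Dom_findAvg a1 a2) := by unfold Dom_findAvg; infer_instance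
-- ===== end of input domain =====

-- B replaces A's build-a-range-and-pop-both-ends loop with the closed form (a1+a2)//2 (O(1) vs O(|a1-a2|)).

-- ===== PORT A =====
-- the while loop: a.pop(0) drops the first element, a.pop(-1) drops the last
def trimA (a : List Int) : List Int :=
  if 2 < a.length then trimA ((a.drop 1).dropLast) else a
termination_by a.length
decreasing_by simp_all [List.length_dropLast]; omega

-- A's list is never empty (range lo..hi+1 with lo ≤ hi), so a[0] always exists;
-- the .getD 0 default is never taken.
def findAvg (a1 : Int) (a2 : Int) : Int :=
  let a := if a1 > a2 then PySem.List.pyRange a2 (a1+1) 1 else PySem.List.pyRange a1 (a2+1) 1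
  (PySem.List.pyGet? (trimA a) 0).getD 0

-- ===== PORT B =====
def findAvg_alt (a1 : Int) (a2 : Int) : Int := PySem.Int.floordiv (a1 + a2) 2

-- ===== PRECONDITION & SPEC =====
def Spec_findAvg (a1 : Int) (a2 : Int) (out : Int) : Prop := out = findAvg_alt a1 a2
instance (a1 : Int) (a2 : Int) (out : Int) : Decidable (Spec_findAvg a1 a2 out) := by unfold Spec_findAvg; infer_instance

-- ===== CLAIM (what is proved, stated in full; the proofs are below) =====
def Claim_equal_findAvg : Prop := ∀ (a1 : Int) (a2 : Int), Dom_findAvg a1 a2 → Spec_findAvg a1 a2 (findAvg a1 a2)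

-- ===== LEMMAS AND PROOFS =====

lemma trimA_main : ∀ (k : Nat) (lo hi : Int), lo ≤ hi → (hi - lo).toNat = k →
    (PySem.List.pyGet? (trimA (PySem.List.pyRange lo (hi+1) 1)) 0).getD 0
      = PySem.Int.floordiv (lo + hi) 2 := by
  intro k
  induction k using Nat.strong_induction_on with
  | _ k ih =>
    intro lo hi hle hk
    match k, hk with
    | 0, hk =>
      have h : hi = lo := by omega
      subst h
      rw [PySem.List.pyRange_one_cons (by omega), PySem.List.pyRange_one_eq_nil (by omega)]
      rw [trimA]
      simp
      omega
    | 1, hk =>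
      have h : hi = lo + 1 := by omega
      subst h
      rw [PySem.List.pyRange_one_cons (by omega), PySem.List.pyRange_one_cons (by omega),
          PySem.List.pyRange_one_eq_nil (by omega)]
      rw [trimA]
      simp
      omega
    | (k+2), hk =>
      have hcons : PySem.List.pyRange lo (hi+1) 1 = lo :: PySem.List.pyRange (lo+1) (hi+1) 1 :=
        PySem.List.pyRange_one_cons (by omega)
      have hsnoc : PySem.List.pyRange (lo+1) (hi+1) 1 = PySem.List.pyRange (lo+1) hi 1 ++ [hi] :=
        PySem.List.pyRange_one_succ_right (by omega)
      have hlen : 2 < (PySem.List.pyRange lo (hi+1) 1).length := by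
        rw [PySem.List.length_pyRange_one]; omega
      rw [trimA, if_pos hlen, hcons, hsnoc]
      simp only [List.drop_succ_cons, List.drop_zero, List.dropLast_concat]
      have hmid : PySem.List.pyRange (lo+1) hi 1 = PySem.List.pyRange (lo+1) ((hi-1)+1) 1 := by
        norm_num
      rw [hmid, ih k (by omega) (lo+1) (hi-1) (by omega) (by omega)]
      have : lo + 1 + (hi - 1) = lo + hi := by ring
      rw [this]

theorem findAvg_eq (a1 a2 : Int) : findAvg a1 a2 = findAvg_alt a1 a2 := by
  unfold findAvg findAvg_alt
  by_cases h : a1 > a2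
  · simp only [if_pos h]
    rw [trimA_main (a1 - a2).toNat a2 a1 (by omega) rfl]
    rw [Int.add_comm]
  · simp only [if_neg h]
    rw [trimA_main (a2 - a1).toNat a1 a2 (by omega) rfl]

-- ===== VERDICT (by name: the statement is the Claim_ definition above) =====
theorem findAvg_spec : Claim_equal_findAvg := by
  intro a1 a2 _
  exact findAvg_eq a1 a2
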